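-- pv_equiv track=rewrite | github.com/toddkingsing/imap-to-webhook | fingerprint.py | _detect_provider_from_headers
-- ===== SOURCE A (Python) =====
-- def _detect_provider_from_headers(headers: dict) -> str:
--     """Detect provider from provider-specific email headers."""
--     if any(
--         headers.get(h)
--         for h in (
--             "x-ms-exchange-organization-authas",
--             "x-ms-exchange-crosstenant-id",
--             "x-originatororg",
--         )
--     ):
--         return "Microsoft 365"
--     if any(
--         headers.get(h) for h in ("x-gm-message-state", "x-google-dkim-signature")
--     ):
--         return "Google Workspace"
--     if any(headers.get(h) for h in ("x-qq-mid", "x-qq-ssf")):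
--         return "Tencent QQ Mail"
--     if any(headers.get(h) for h in ("x-cm-transid", "x-coremail-antispam")):
--         return "NetEase"
--     if headers.get("x-pm-message-id"):
--         return "ProtonMail"
--     return ""
-- ===== SOURCE B (Python) =====
-- # B: single pass over the headers themselves — each truthy header's key is mapped
-- # by a priority table to its provider rank; a min-accumulator keeps the best rank,
-- # indexed into the name table at the end (no per-provider lookups, no short-circuit chain).
-- _PRIORITY = {
--     "x-ms-exchange-organization-authas": 0,
--     "x-ms-exchange-crosstenant-id": 0,
--     "x-originatororg": 0,
--     "x-gm-message-state": 1,
--     "x-google-dkim-signature": 1,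
--     "x-qq-mid": 2,
--     "x-qq-ssf": 2,
--     "x-cm-transid": 3,
--     "x-coremail-antispam": 3,
--     "x-pm-message-id": 4,
-- }
-- _NAMES = ("Microsoft 365", "Google Workspace", "Tencent QQ Mail", "NetEase", "ProtonMail", "")
--
-- def _detect_provider_from_headers(headers: dict) -> str:
--     """Detect provider from provider-specific email headers."""
--     best = 5
--     for key, value in headers.items():
--         if value:
--             best = min(best, _PRIORITY.get(key, 5))
--     return _NAMES[best]
-- ===== Notes on version B (the rewrite author's own statement) =====
-- stated objective: alternative
-- what changed: Instead of A's per-provider if-chain doing headers.get lookups for each known key, B makes one pass over the headers items, mapping each truthy header key through a key-to-rank table into a min-priority accumulator and indexing a name table at the end. Pre_ only excludes association lists with duplicate keys, which do not represent any Python dict (A takes a dict), so first-vs-later occurrence there is an encoding artifact.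
import Mathlib
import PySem

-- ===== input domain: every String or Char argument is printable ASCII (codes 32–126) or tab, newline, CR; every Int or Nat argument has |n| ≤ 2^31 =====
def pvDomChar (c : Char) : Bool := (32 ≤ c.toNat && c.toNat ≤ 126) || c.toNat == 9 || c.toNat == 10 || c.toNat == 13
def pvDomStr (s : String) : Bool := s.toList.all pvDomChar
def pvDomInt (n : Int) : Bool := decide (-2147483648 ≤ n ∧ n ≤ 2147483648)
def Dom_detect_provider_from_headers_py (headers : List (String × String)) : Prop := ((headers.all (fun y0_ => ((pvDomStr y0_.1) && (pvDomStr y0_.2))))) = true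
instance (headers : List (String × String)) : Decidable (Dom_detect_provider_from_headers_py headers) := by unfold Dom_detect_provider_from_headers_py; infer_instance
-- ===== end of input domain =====

-- B replaces A's per-provider if-chain of dict lookups by one pass over the headers
-- items with a key→rank table and a min-priority accumulator; return values identical.

-- `headers.get(h)` is truthy: the key maps (first match) to a non-empty string.
def pvTruthyGet (headers : List (String × String)) (h : String) : Bool :=
  match headers.find? (fun p => p.1 == h) with
  | some p => p.2 != ""
  | none => false

-- ===== PORT A =====
def detect_provider_from_headers_py (headers : List (String × String)) : String :=
  if ["x-ms-exchange-organization-authas", "x-ms-exchange-crosstenant-id",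
      "x-originatororg"].any (pvTruthyGet headers) then "Microsoft 365"
  else if ["x-gm-message-state", "x-google-dkim-signature"].any (pvTruthyGet headers) then
    "Google Workspace"
  else if ["x-qq-mid", "x-qq-ssf"].any (pvTruthyGet headers) then "Tencent QQ Mail"
  else if ["x-cm-transid", "x-coremail-antispam"].any (pvTruthyGet headers) then "NetEase"
  else if pvTruthyGet headers "x-pm-message-id" then "ProtonMail"
  else ""

-- ===== PORT B =====
def pvPriority : List (String × Nat) :=
  [("x-ms-exchange-organization-authas", 0), ("x-ms-exchange-crosstenant-id", 0),
   ("x-originatororg", 0),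
   ("x-gm-message-state", 1), ("x-google-dkim-signature", 1),
   ("x-qq-mid", 2), ("x-qq-ssf", 2),
   ("x-cm-transid", 3), ("x-coremail-antispam", 3),
   ("x-pm-message-id", 4)]

def pvNames : List String :=
  ["Microsoft 365", "Google Workspace", "Tencent QQ Mail", "NetEase", "ProtonMail", ""]

-- _PRIORITY.get(key, 5)
def pvPrio (k : String) : Nat :=
  match pvPriority.find? (fun p => p.1 == k) with
  | some p => p.2
  | none => 5

def pvStep (best : Nat) (kv : String × String) : Nat :=
  if kv.2 ≠ "" then min best (pvPrio kv.1) else best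

def detect_provider_from_headers_py_alt (headers : List (String × String)) : String :=
  pvNames.getD (headers.foldl pvStep 5) ""

-- ===== PRECONDITION & SPEC =====
-- Pre_ excludes association lists with duplicate keys: they do not represent any
-- Python dict (A's parameter is a dict), so behaviour there is an encoding artifact.
def Pre_detect_provider_from_headers_py (headers : List (String × String)) : Prop :=
  (headers.map Prod.fst).Nodup
instance (headers : List (String × String)) : Decidable (Pre_detect_provider_from_headers_py headers) := by unfold Pre_detect_provider_from_headers_py; infer_instance

def pvWitness_detect_provider_from_headers_py : (List (String × String)) :=
  [("x-qq-mid", "1"), ("subject", "hi")]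

def Spec_detect_provider_from_headers_py (headers : List (String × String)) (out : String) : Prop := out = detect_provider_from_headers_py_alt headers
instance (headers : List (String × String)) (out : String) : Decidable (Spec_detect_provider_from_headers_py headers out) := by unfold Spec_detect_provider_from_headers_py; infer_instance

-- ===== CLAIM (what is proved, stated in full; the proofs are below) =====
def Claim_equal_detect_provider_from_headers_py : Prop := ∀ (headers : List (String × String)), Dom_detect_provider_from_headers_py headers → Pre_detect_provider_from_headers_py headers → Spec_detect_provider_from_headers_py headers (detect_provider_from_headers_py headers)

-- ===== LEMMAS AND PROOFS =====

-- pvPrio as an if-chain over group membership.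
lemma pvPrio_eq (k : String) :
    pvPrio k =
      if k = "x-ms-exchange-organization-authas" ∨ k = "x-ms-exchange-crosstenant-id" ∨
         k = "x-originatororg" then 0
      else if k = "x-gm-message-state" ∨ k = "x-google-dkim-signature" then 1
      else if k = "x-qq-mid" ∨ k = "x-qq-ssf" then 2
      else if k = "x-cm-transid" ∨ k = "x-coremail-antispam" then 3
      else if k = "x-pm-message-id" then 4
      else 5 := by
  split_ifs with h1 h2 h3 h4 h5
  · rcases h1 with rfl | rfl | rfl <;> decide
  · rcases h2 with rfl | rfl <;> decide
  · rcases h3 with rfl | rfl <;> decide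
  · rcases h4 with rfl | rfl <;> decide
  · subst h5; decide
  · push Not at h1 h2 h3 h4
    obtain ⟨a1, a2, a3⟩ := h1
    obtain ⟨b1, b2⟩ := h2
    obtain ⟨c1, c2⟩ := h3
    obtain ⟨d1, d2⟩ := h4
    have e : ∀ s : String, ¬ k = s → (s == k) = false :=
      fun s h => beq_eq_false_iff_ne.mpr fun he => h he.symm
    simp only [pvPrio, pvPriority, List.find?, e _ a1, e _ a2, e _ a3, e _ b1, e _ b2,
      e _ c1, e _ c2, e _ d1, e _ d2, e _ h5]

lemma pvPrio_le5 (k : String) : pvPrio k ≤ 5 := by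
  rw [pvPrio_eq]; split_ifs <;> omega

lemma foldl_step_le : ∀ (l : List (String × String)) (b : Nat), l.foldl pvStep b ≤ b := by
  intro l
  induction l with
  | nil => intro b; simp
  | cons kv t ih =>
    intro b
    have h1 : pvStep b kv ≤ b := by
      unfold pvStep; split <;> omega
    calc (kv :: t).foldl pvStep b = t.foldl pvStep (pvStep b kv) := rfl
      _ ≤ pvStep b kv := ih _
      _ ≤ b := h1

lemma foldl_step_min : ∀ (l : List (String × String)) (b : Nat), b ≤ 5 →
    l.foldl pvStep b = min b (l.foldl pvStep 5) := by
  intro l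
  induction l with
  | nil => intro b hb; simp only [List.foldl_nil]; omega
  | cons kv t ih =>
    intro b hb
    have hp := pvPrio_le5 kv.1
    have hX := foldl_step_le t 5
    have hsb : pvStep b kv ≤ 5 := by unfold pvStep; split <;> omega
    have h5 : pvStep 5 kv ≤ 5 := by unfold pvStep; split <;> omega
    show t.foldl pvStep (pvStep b kv) = min b (t.foldl pvStep (pvStep 5 kv))
    rw [ih _ hsb, ih _ h5]
    unfold pvStep
    split <;> omega

lemma best_le_iff (l : List (String × String)) (i : Nat) (hi : i < 5) :
    l.foldl pvStep 5 ≤ i ↔ ∃ kv ∈ l, kv.2 ≠ "" ∧ pvPrio kv.1 ≤ i := by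
  induction l with
  | nil => simp; omega
  | cons kv t ih =>
    have hp := pvPrio_le5 kv.1
    have hsb : pvStep 5 kv ≤ 5 := by unfold pvStep; split <;> omega
    have hmin : (kv :: t).foldl pvStep 5 = min (pvStep 5 kv) (t.foldl pvStep 5) := by
      show t.foldl pvStep (pvStep 5 kv) = _
      rw [foldl_step_min t _ hsb]
    rw [hmin]
    constructor
    · intro h
      rcases min_le_iff.mp h with h | h
      · refine ⟨kv, by simp, ?_⟩
        unfold pvStep at h
        split at h
        · exact ⟨by assumption, by omega⟩
        · omega
      · rcases ih.mp h with ⟨x, hx, hxt, hxp⟩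
        exact ⟨x, by simp [hx], hxt, hxp⟩
    · rintro ⟨x, hx, hxt, hxp⟩
      rcases List.mem_cons.mp hx with rfl | hx
      · apply min_le_iff.mpr; left
        unfold pvStep; rw [if_pos hxt]; omega
      · exact min_le_iff.mpr (Or.inr (ih.mpr ⟨x, hx, hxt, hxp⟩))

-- Under Nodup keys, truthy-get is membership of a non-empty binding.
lemma truthy_iff : ∀ (headers : List (String × String)), (headers.map Prod.fst).Nodup →
    ∀ k, (pvTruthyGet headers k = true ↔ ∃ v, (k, v) ∈ headers ∧ v ≠ "") := by
  intro headers
  induction headers with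
  | nil => intro _ k; simp [pvTruthyGet, List.find?]
  | cons a t ih =>
    intro hnd k
    rw [List.map_cons, List.nodup_cons] at hnd
    obtain ⟨hnot, hnd'⟩ := hnd
    by_cases hk : a.1 = k
    · subst hk
      have hfind : pvTruthyGet (a :: t) a.1 = (a.2 != "") := by
        simp [pvTruthyGet, List.find?]
      rw [hfind]
      constructor
      · intro h
        exact ⟨a.2, by simp, by simpa using h⟩
      · rintro ⟨v, hv, hvne⟩
        rcases List.mem_cons.mp hv with heq | hmem
        · have hva : a.2 = v := by rw [← heq]
          simpa [hva] using hvne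
        · exact absurd (List.mem_map.mpr ⟨(a.1, v), hmem, rfl⟩) hnot
    · have hne : (a.1 == k) = false := beq_eq_false_iff_ne.mpr hk
      have hfind : pvTruthyGet (a :: t) k = pvTruthyGet t k := by
        simp [pvTruthyGet, List.find?, hne]
      rw [hfind, ih hnd' k]
      constructor
      · rintro ⟨v, hv, hvne⟩; exact ⟨v, List.mem_cons_of_mem _ hv, hvne⟩
      · rintro ⟨v, hv, hvne⟩
        rcases List.mem_cons.mp hv with heq | hmem
        · exact absurd (congrArg Prod.fst heq).symm hk
        · exact ⟨v, hmem, hvne⟩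

-- group condition ↔ a truthy binding whose key has that priority level
lemma group_iff (headers : List (String × String))
    (hnd : (headers.map Prod.fst).Nodup) (g : List String) (i : Nat)
    (hg : ∀ k, k ∈ g ↔ pvPrio k = i) :
    g.any (pvTruthyGet headers) = true ↔
      ∃ kv ∈ headers, kv.2 ≠ "" ∧ pvPrio kv.1 = i := by
  rw [List.any_eq_true]
  constructor
  · rintro ⟨k, hk, ht⟩
    rcases (truthy_iff headers hnd k).mp ht with ⟨v, hv, hvne⟩
    exact ⟨(k, v), hv, hvne, (hg k).mp hk⟩
  · rintro ⟨kv, hkv, hne, hp⟩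
    refine ⟨kv.1, (hg kv.1).mpr hp, (truthy_iff headers hnd kv.1).mpr ⟨kv.2, by simpa, hne⟩⟩

-- membership characterizations for the five groups
lemma hg0 : ∀ k, k ∈ ["x-ms-exchange-organization-authas", "x-ms-exchange-crosstenant-id",
    "x-originatororg"] ↔ pvPrio k = 0 := by
  intro k; rw [pvPrio_eq]
  split_ifs with h1 h2 h3 h4 h5
  · rcases h1 with rfl | rfl | rfl <;> decide
  · rcases h2 with rfl | rfl <;> decide
  · rcases h3 with rfl | rfl <;> decide
  · rcases h4 with rfl | rfl <;> decide
  · subst h5; decide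
  · simp_all
lemma hg1 : ∀ k, k ∈ ["x-gm-message-state", "x-google-dkim-signature"] ↔ pvPrio k = 1 := by
  intro k; rw [pvPrio_eq]
  split_ifs with h1 h2 h3 h4 h5
  · rcases h1 with rfl | rfl | rfl <;> decide
  · rcases h2 with rfl | rfl <;> decide
  · rcases h3 with rfl | rfl <;> decide
  · rcases h4 with rfl | rfl <;> decide
  · subst h5; decide
  · simp_all
lemma hg2 : ∀ k, k ∈ ["x-qq-mid", "x-qq-ssf"] ↔ pvPrio k = 2 := by
  intro k; rw [pvPrio_eq]
  split_ifs with h1 h2 h3 h4 h5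
  · rcases h1 with rfl | rfl | rfl <;> decide
  · rcases h2 with rfl | rfl <;> decide
  · rcases h3 with rfl | rfl <;> decide
  · rcases h4 with rfl | rfl <;> decide
  · subst h5; decide
  · simp_all
lemma hg3 : ∀ k, k ∈ ["x-cm-transid", "x-coremail-antispam"] ↔ pvPrio k = 3 := by
  intro k; rw [pvPrio_eq]
  split_ifs with h1 h2 h3 h4 h5
  · rcases h1 with rfl | rfl | rfl <;> decide
  · rcases h2 with rfl | rfl <;> decide
  · rcases h3 with rfl | rfl <;> decide
  · rcases h4 with rfl | rfl <;> decide
  · subst h5; decide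
  · simp_all
lemma hg4 : ∀ k, k ∈ ["x-pm-message-id"] ↔ pvPrio k = 4 := by
  intro k; rw [pvPrio_eq]
  split_ifs with h1 h2 h3 h4 h5
  · rcases h1 with rfl | rfl | rfl <;> decide
  · rcases h2 with rfl | rfl <;> decide
  · rcases h3 with rfl | rfl <;> decide
  · rcases h4 with rfl | rfl <;> decide
  · subst h5; decide
  · simp_all

-- ===== VERDICT (by name: the statement is the Claim_ definition above) =====
theorem detect_provider_from_headers_py_spec : Claim_equal_detect_provider_from_headers_py := by
  intro headers _ hnd
  unfold Spec_detect_provider_from_headers_py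
  unfold Pre_detect_provider_from_headers_py at hnd
  set best := headers.foldl pvStep 5 with hbest
  have hb5 : best ≤ 5 := foldl_step_le headers 5
  have h0 := group_iff headers hnd _ 0 hg0
  have h1 := group_iff headers hnd _ 1 hg1
  have h2 := group_iff headers hnd _ 2 hg2
  have h3 := group_iff headers hnd _ 3 hg3
  have h4 : pvTruthyGet headers "x-pm-message-id" = true ↔
      ∃ kv ∈ headers, kv.2 ≠ "" ∧ pvPrio kv.1 = 4 := by
    simpa using group_iff headers hnd _ 4 hg4
  have key : ∀ i, i < 5 → (best ≤ i ↔ ∃ j ≤ i, ∃ kv ∈ headers, kv.2 ≠ "" ∧ pvPrio kv.1 = j) := by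
    intro i hi
    rw [hbest, best_le_iff headers i hi]
    constructor
    · rintro ⟨kv, hkv, hne, hle⟩; exact ⟨pvPrio kv.1, hle, kv, hkv, hne, rfl⟩
    · rintro ⟨j, hj, kv, hkv, hne, hp⟩; exact ⟨kv, hkv, hne, by omega⟩
  unfold detect_provider_from_headers_py detect_provider_from_headers_py_alt
  rw [← hbest]
  split_ifs with c0 c1 c2 c3 c4
  · have hle : best ≤ 0 := (key 0 (by omega)).mpr ⟨0, le_refl _, h0.mp c0⟩
    have hb : best = 0 := by omega
    rw [hb]; decide
  · have hle : best ≤ 1 := (key 1 (by omega)).mpr ⟨1, le_refl _, h1.mp c1⟩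
    have hgt : ¬ best ≤ 0 := by
      intro h
      rcases (key 0 (by omega)).mp h with ⟨j, hj, hkv⟩
      interval_cases j
      exact c0 (h0.mpr hkv)
    have hb : best = 1 := by omega
    rw [hb]; decide
  · have hle : best ≤ 2 := (key 2 (by omega)).mpr ⟨2, le_refl _, h2.mp c2⟩
    have hgt : ¬ best ≤ 1 := by
      intro h
      rcases (key 1 (by omega)).mp h with ⟨j, hj, hkv⟩
      interval_cases j
      · exact c0 (h0.mpr hkv)
      · exact c1 (h1.mpr hkv)
    have hb : best = 2 := by omega
    rw [hb]; decide
  · have hle : best ≤ 3 := (key 3 (by omega)).mpr ⟨3, le_refl _, h3.mp c3⟩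
    have hgt : ¬ best ≤ 2 := by
      intro h
      rcases (key 2 (by omega)).mp h with ⟨j, hj, hkv⟩
      interval_cases j
      · exact c0 (h0.mpr hkv)
      · exact c1 (h1.mpr hkv)
      · exact c2 (h2.mpr hkv)
    have hb : best = 3 := by omega
    rw [hb]; decide
  · have hle : best ≤ 4 := (key 4 (by omega)).mpr ⟨4, le_refl _, h4.mp c4⟩
    have hgt : ¬ best ≤ 3 := by
      intro h
      rcases (key 3 (by omega)).mp h with ⟨j, hj, hkv⟩
      interval_cases j
      · exact c0 (h0.mpr hkv)
      · exact c1 (h1.mpr hkv)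
      · exact c2 (h2.mpr hkv)
      · exact c3 (h3.mpr hkv)
    have hb : best = 4 := by omega
    rw [hb]; decide
  · have hgt : ¬ best ≤ 4 := by
      intro h
      rcases (key 4 (by omega)).mp h with ⟨j, hj, hkv⟩
      interval_cases j
      · exact c0 (h0.mpr hkv)
      · exact c1 (h1.mpr hkv)
      · exact c2 (h2.mpr hkv)
      · exact c3 (h3.mpr hkv)
      · exact c4 (h4.mpr hkv)
    have hb : best = 5 := by omega
    rw [hb]; decide
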